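-- pv_equiv track=rewrite | github.com/victord03/solve_arithmetic_sequence | solver.py | solve_for_addition_results_pattern
-- ===== SOURCE A (Python) =====
-- def solve_for_addition(sequence: list[int]) -> int:
--
--     value = list()
--     pattern = 0
--
--     for index, number in enumerate(sequence):
--
--         if index == 0:
--             continue
--
--         previous_number = sequence[index - 1]
--         difference = number - previous_number
--
--         value.append(difference)
--
--     if len(set(value)) == 1:
--         pattern = value[0]
--
--     return pattern
--
-- def solve_for_addition_results_pattern(sequence: list[int]) -> int:
--
--     value = list()
--
--     for index, number in enumerate(sequence):
--
--         if index == 0: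
--             continue
--
--         previous_number = sequence[index - 1]
--         difference = number - previous_number
--
--         value.append(difference)
--
--     pattern = solve_for_addition(value)
--
--     return pattern
-- ===== SOURCE B (Python) =====
-- def solve_for_addition_results_pattern(sequence: list[int]) -> int:
--     diffs = [c - 2 * b + a for a, b, c in zip(sequence, sequence[1:], sequence[2:])]
--     if diffs and all(d == diffs[0] for d in diffs):
--         return diffs[0]
--     return 0
-- ===== Notes on version B (the rewrite author's own statement) =====
-- stated objective: simpler
-- what changed: B computes second differences directly in one sliding-triple zip pass (c - 2*b + a) and checks all-equal against the first, instead of A's two cascaded first-difference loops plus a set-cardinality test.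
import Mathlib
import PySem

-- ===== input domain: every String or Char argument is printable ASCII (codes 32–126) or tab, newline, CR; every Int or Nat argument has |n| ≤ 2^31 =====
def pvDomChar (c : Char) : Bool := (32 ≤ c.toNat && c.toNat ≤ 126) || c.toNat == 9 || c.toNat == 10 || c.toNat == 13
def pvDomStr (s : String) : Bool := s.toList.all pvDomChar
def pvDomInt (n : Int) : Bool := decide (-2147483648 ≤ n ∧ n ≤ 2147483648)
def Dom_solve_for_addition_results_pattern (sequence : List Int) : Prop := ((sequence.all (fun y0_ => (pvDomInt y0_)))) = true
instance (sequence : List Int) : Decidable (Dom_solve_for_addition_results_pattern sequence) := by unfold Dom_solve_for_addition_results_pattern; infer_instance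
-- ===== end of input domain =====

-- One honest line: B replaces A's two cascaded first-difference loops + set test by a single
-- sliding-triple pass computing second differences and an all-equal check (objective: simpler).

-- ===== PORT A =====
-- the first-difference loop shared verbatim by both Python functions
-- ('for index, number in enumerate(sequence): if index == 0: continue; value.append(number - sequence[index-1])')
def pvDiffLoop (sequence : List Int) : List Int :=
  (PySem.List.enumerate sequence 0).foldl
    (fun value p =>
      if p.1 = 0 then value
      else value ++ [p.2 - PySem.List.pyGetD sequence (p.1 - 1) 0]) []
    -- index-1 is always in range when the branch runs, so pyGetD's default is never used

def solve_for_addition (sequence : List Int) : Int :=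
  let value := pvDiffLoop sequence
  if PySem.Set.len (PySem.Set.ofList value) = 1 then PySem.List.pyGetD value 0 0 else 0
  -- value[0] is guarded by the set test (value nonempty there), so pyGetD's default is never used

def solve_for_addition_results_pattern (sequence : List Int) : Int :=
  solve_for_addition (pvDiffLoop sequence)

-- ===== PORT B =====
-- port of the zip(sequence, sequence[1:], sequence[2:]) comprehension: a sliding triple
def pvSecondDiffs : List Int → List Int
  | a :: b :: c :: r => (c - 2 * b + a) :: pvSecondDiffs (b :: c :: r)
  | _ => []

def solve_for_addition_results_pattern_alt (sequence : List Int) : Int :=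
  match pvSecondDiffs sequence with
  | [] => 0
  | d :: r => if (d :: r).all (fun x => x == d) then d else 0

-- ===== PRECONDITION & SPEC =====
def Spec_solve_for_addition_results_pattern (sequence : List Int) (out : Int) : Prop := out = solve_for_addition_results_pattern_alt sequence
instance (sequence : List Int) (out : Int) : Decidable (Spec_solve_for_addition_results_pattern sequence out) := by unfold Spec_solve_for_addition_results_pattern; infer_instance

-- ===== CLAIM (what is proved, stated in full; the proofs are below) =====
def Claim_equal_solve_for_addition_results_pattern : Prop := ∀ (sequence : List Int), Dom_solve_for_addition_results_pattern sequence → Spec_solve_for_addition_results_pattern sequence (solve_for_addition_results_pattern sequence)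

-- ===== LEMMAS AND PROOFS =====

-- clean first differences, used only in the proofs
def pvFDiffs : List Int → List Int
  | a :: b :: r => (b - a) :: pvFDiffs (b :: r)
  | _ => []

theorem pvDiffLoop_aux (xs : List Int) : ∀ (front : List Int) (hf : front ≠ []),
    (PySem.List.enumerate xs (front.length)).map
      (fun p => p.2 - PySem.List.pyGetD (front ++ xs) (p.1 - 1) 0)
    = pvFDiffs (front.getLast hf :: xs) := by
  induction xs with
  | nil => intro front hf; simp [PySem.List.enumerate_nil, pvFDiffs]
  | cons y ys ih =>
    intro front hf
    rw [PySem.List.enumerate_cons, List.map_cons]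
    have hpos := List.length_pos_of_ne_nil hf
    have hlen : (front.length : Int) - 1 = ((front.length - 1 : Nat) : Int) := by
      push_cast [hpos]; omega
    have hget : PySem.List.pyGetD (front ++ y :: ys) ((front.length : Int) - 1) 0
        = front.getLast hf := by
      rw [hlen, PySem.List.pyGetD_natCast]
      have hlt : front.length - 1 < front.length := by omega
      rw [List.getD_eq_getElem?_getD, List.getElem?_append_left hlt,
        List.getElem?_eq_getElem hlt, List.getLast_eq_getElem]
      rfl
    have hrest := ih (front ++ [y]) (by simp)
    simp only [List.length_append, List.length_cons, List.length_nil,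
      List.getLast_append_singleton, List.append_assoc, List.cons_append, List.nil_append] at hrest
    have hcast : (front.length : Int) + 1 = ((front.length + 1 : Nat) : Int) := by push_cast; ring
    rw [hget, hcast, hrest]
    rfl

theorem pvDiffLoop_eq_fdiffs (s : List Int) : pvDiffLoop s = pvFDiffs s := by
  unfold pvDiffLoop
  have hfun : (fun (value : List Int) (p : Int × Int) =>
        if p.1 = 0 then value else value ++ [p.2 - PySem.List.pyGetD s (p.1 - 1) 0])
      = (fun value p =>
        if p.1 ≠ 0 then value ++ [p.2 - PySem.List.pyGetD s (p.1 - 1) 0] else value) := by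
    funext value p; by_cases h : p.1 = 0 <;> simp [h]
  rw [hfun, PySem.List.foldl_append_ite]
  cases s with
  | nil => simp [PySem.List.enumerate_nil, pvFDiffs]
  | cons a xs =>
    rw [PySem.List.enumerate_cons]
    have hfilter : (PySem.List.enumerate xs (0 + 1)).filter (fun p => decide (p.1 ≠ 0))
        = PySem.List.enumerate xs (0 + 1) := by
      rw [List.filter_eq_self]
      intro p hp
      rcases (PySem.List.mem_enumerate_iff xs (0 + 1) p).1 hp with ⟨k, hk, rfl⟩
      simp; omega
    rw [List.filter_cons]
    simp only [show (decide (¬(0 : Int) = 0)) = false by simp, Bool.false_eq_true, if_false]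
    rw [hfilter]
    have := pvDiffLoop_aux xs [a] (by simp)
    simpa using this

theorem fdiffs_fdiffs : ∀ (s : List Int), pvFDiffs (pvFDiffs s) = pvSecondDiffs s
  | a :: b :: c :: r => by
    rw [show pvFDiffs (a :: b :: c :: r) = (b - a) :: (c - b) :: pvFDiffs (c :: r) from rfl]
    rw [show pvFDiffs ((b - a) :: (c - b) :: pvFDiffs (c :: r))
        = ((c - b) - (b - a)) :: pvFDiffs ((c - b) :: pvFDiffs (c :: r)) from rfl]
    rw [show pvFDiffs ((c - b) :: pvFDiffs (c :: r)) = pvFDiffs (pvFDiffs (b :: c :: r)) from rfl]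
    rw [fdiffs_fdiffs (b :: c :: r)]
    show _ = (c - 2 * b + a) :: pvSecondDiffs (b :: c :: r)
    ring_nf
  | [] => rfl
  | [_] => rfl
  | [_, _] => rfl

theorem ofList_all_eq {d : Int} {v : List Int} (h : ∀ y ∈ v, y = d) :
    PySem.Set.ofList v = [] ∨ PySem.Set.ofList v = [d] := by
  induction v with
  | nil => left; rfl
  | cons y ys ih =>
    have hy : y = d := h y (by simp)
    rcases ih (fun z hz => h z (by simp [hz])) with h0 | h0 <;>
      · right
        rw [PySem.Set.ofList_cons, h0, hy]
        simp [PySem.Set.discard]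

theorem answer_eq (v : List Int) :
    (if PySem.Set.len (PySem.Set.ofList v) = 1 then PySem.List.pyGetD v 0 0 else 0)
    = (match v with
       | [] => 0
       | d :: r => if (d :: r).all (fun x => x == d) then d else 0 : Int) := by
  cases v with
  | nil => rfl
  | cons d r =>
    have hlen_iff : PySem.Set.len (PySem.Set.ofList (d :: r)) = 1
        ↔ (PySem.Set.ofList (d :: r)).length = 1 := by
      simp only [PySem.Set.len]; omega
    have key : (PySem.Set.ofList (d :: r)).length = 1 ↔ ∀ x ∈ r, x = d := by
      constructor
      · intro hlen x hx
        obtain ⟨z, hz⟩ := List.length_eq_one_iff.1 hlen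
        have hd := (PySem.Set.mem_ofList (d :: r) d).2 (by simp)
        have hxm := (PySem.Set.mem_ofList (d :: r) x).2 (by simp [hx])
        rw [hz] at hd hxm
        simp at hd hxm
        rw [hxm, hd]
      · intro hall
        have h1 : ∀ y ∈ d :: r, y = d := by
          intro y hy
          rcases List.mem_cons.1 hy with h | h
          · exact h
          · exact hall y h
        rcases ofList_all_eq h1 with h0 | h0
        · have hd := (PySem.Set.mem_ofList (d :: r) d).2 (by simp)
          rw [h0] at hd; simp at hd
        · rw [h0]; rfl
    show (if PySem.Set.len (PySem.Set.ofList (d :: r)) = 1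
          then PySem.List.pyGetD (d :: r) 0 0 else 0)
        = if (d :: r).all (fun x => x == d) then d else 0
    by_cases hall : ∀ x ∈ r, x = d
    · have hA : ((d :: r).all (fun x => x == d)) = true := by
        simp only [List.all_eq_true, beq_iff_eq]
        intro x hx
        rcases List.mem_cons.1 hx with h | h
        · exact h
        · exact hall x h
      rw [if_pos (hlen_iff.2 (key.2 hall)), if_pos hA]
      simp [PySem.List.pyGetD, PySem.List.pyIdx?, PySem.List.pyGet?]
    · have hA : ¬ (((d :: r).all (fun x => x == d)) = true) := by
        simp only [List.all_eq_true, beq_iff_eq]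
        intro hc
        exact hall fun x hx => hc x (List.mem_cons_of_mem d hx)
      rw [if_neg (fun hc => hall (key.1 (hlen_iff.1 hc))), if_neg hA]

-- ===== VERDICT (by name: the statement is the Claim_ definition above) =====
theorem solve_for_addition_results_pattern_spec : Claim_equal_solve_for_addition_results_pattern := by
  intro s _
  unfold Spec_solve_for_addition_results_pattern
  unfold solve_for_addition_results_pattern solve_for_addition solve_for_addition_results_pattern_alt
  rw [pvDiffLoop_eq_fdiffs, pvDiffLoop_eq_fdiffs, fdiffs_fdiffs]
  exact answer_eq (pvSecondDiffs s)
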